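-- pv_equiv track=rewrite | github.com/Shivam101s/NEST_unlearning | scripts/ana_performance.py | _baseline_index
-- ===== SOURCE A (Python) =====
-- def _baseline_index(results):
--     iters = results.get('iter', [])
--     if not iters:
--         return 0
--     for i, it in enumerate(iters):
--         if it == 0:
--             return i
--     # else earliest
--     min_i = min(range(len(iters)), key=lambda k: iters[k])
--     return min_i
-- ===== SOURCE B (Python) =====
-- def _baseline_index(results):
--     # Single fused pass: return on first zero, else track first minimal index.
--     iters = results.get('iter', [])
--     if not iters:
--         return 0
--     best_i = 0
--     best_v = iters[0]
--     for i, it in enumerate(iters):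
--         if it == 0:
--             return i
--         if it < best_v:
--             best_i, best_v = i, it
--     return best_i
-- ===== Notes on version B (the rewrite author's own statement) =====
-- stated objective: alternative
-- what changed: Replaced the two separate traversals (a zero-scan loop followed by min(range(len), key=...)) by one fused pass over enumerate that returns at the first zero and otherwise tracks the index of the first minimum with a strict '<' comparison.
import Mathlib
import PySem

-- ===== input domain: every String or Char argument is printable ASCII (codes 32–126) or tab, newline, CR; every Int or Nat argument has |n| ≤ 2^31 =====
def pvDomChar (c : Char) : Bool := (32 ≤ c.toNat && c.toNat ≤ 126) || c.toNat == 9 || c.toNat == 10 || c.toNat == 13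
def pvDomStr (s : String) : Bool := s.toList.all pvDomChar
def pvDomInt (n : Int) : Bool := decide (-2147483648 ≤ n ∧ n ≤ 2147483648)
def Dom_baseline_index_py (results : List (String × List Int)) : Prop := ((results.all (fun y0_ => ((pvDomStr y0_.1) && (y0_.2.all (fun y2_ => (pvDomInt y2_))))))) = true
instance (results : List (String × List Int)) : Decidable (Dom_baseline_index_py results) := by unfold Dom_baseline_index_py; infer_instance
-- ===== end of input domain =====

-- ===== PORT A =====
-- 'for i, it in enumerate(iters): if it == 0: return i'
def aZeroScan (pairs : List (Int × Int)) : Option Int :=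
  match pairs with
  | [] => none
  | (i, it) :: rest => if it = 0 then some i else aZeroScan rest

def baseline_index_py (results : List (String × List Int)) : Int :=
  let iters := PySem.Dict.getD ⟨results⟩ "iter" []
  if iters = [] then 0
  else
    match aZeroScan (PySem.List.enumerate iters 0) with
    | some i => i
    | none =>
        PySem.List.minD (PySem.List.pyRange 0 (PySem.List.len iters) 1)
          (fun k => PySem.List.pyGetD iters k 0) 0

-- ===== PORT B =====
-- fused pass: return i at the first zero, else track index of the first minimum
def bLoop (iters : List Int) (i bi bv : Int) : Int :=
  match iters with
  | [] => bi
  | it :: rest =>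
      if it = 0 then i
      else if it < bv then bLoop rest (i + 1) i it
      else bLoop rest (i + 1) bi bv

def baseline_index_py_alt (results : List (String × List Int)) : Int :=
  let iters := PySem.Dict.getD ⟨results⟩ "iter" []
  match iters with
  | [] => 0
  | v0 :: _ => bLoop iters 0 0 v0

-- ===== PRECONDITION & SPEC =====
def Spec_baseline_index_py (results : List (String × List Int)) (out : Int) : Prop := out = baseline_index_py_alt results
instance (results : List (String × List Int)) (out : Int) : Decidable (Spec_baseline_index_py results out) := by unfold Spec_baseline_index_py; infer_instance

-- ===== CLAIM (what is proved, stated in full; the proofs are below) =====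
def Claim_equal_baseline_index_py : Prop := ∀ (results : List (String × List Int)), Dom_baseline_index_py results → Spec_baseline_index_py results (baseline_index_py results)

-- ===== LEMMAS AND PROOFS =====

-- reference: first-minimum index tracking, Nat-indexed (proof-side only)
def refMin (xs : List Int) (i bi : Nat) (bv : Int) : Nat :=
  match xs with
  | [] => bi
  | x :: t => if x < bv then refMin t (i + 1) i x else refMin t (i + 1) bi bv

theorem enumerate_cons {α : Type} (x : α) (xs : List α) (s : Int) :
    PySem.List.enumerate (x :: xs) s = (s, x) :: PySem.List.enumerate xs (s + 1) := rfl

-- B returns the first-zero index when there is one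
theorem bLoop_of_zero (xs : List Int) : ∀ (i bi bv j : Int),
    aZeroScan (PySem.List.enumerate xs i) = some j → bLoop xs i bi bv = j := by
  induction xs with
  | nil => intro i bi bv j h; simp [PySem.List.enumerate, aZeroScan] at h
  | cons x t ih =>
      intro i bi bv j h
      rw [enumerate_cons] at h
      simp only [aZeroScan] at h
      by_cases hx : x = 0
      · simp [hx] at h; simp [bLoop, hx, h]
      · simp only [hx, if_false] at h
        simp only [bLoop, hx, if_false]
        split_ifs <;> exact ih _ _ _ _ h

-- with no zero, B is refMin (cast through Nat indices)
theorem bLoop_of_none (xs : List Int) : ∀ (i bi : Nat) (bv : Int),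
    aZeroScan (PySem.List.enumerate xs (i : Int)) = none →
    bLoop xs (i : Int) (bi : Int) bv = ((refMin xs i bi bv : Nat) : Int) := by
  induction xs with
  | nil => intro i bi bv _; simp [bLoop, refMin]
  | cons x t ih =>
      intro i bi bv h
      rw [enumerate_cons] at h
      simp only [aZeroScan] at h
      by_cases hx : x = 0
      · simp [hx] at h
      · simp only [hx, if_false] at h
        simp only [bLoop, refMin, hx, if_false]
        have h' : aZeroScan (PySem.List.enumerate t ((i + 1 : Nat) : Int)) = none := by
          push_cast; exact_mod_cast h
        split_ifs with hlt
        · have := ih (i + 1) i x h'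
          push_cast at this ⊢; exact this
        · have := ih (i + 1) bi bv h'
          push_cast at this ⊢; exact this

-- the Option-valued min? fold step, named (proof-side only)
def mStep (xs : List Int) (acc : Option Int) (x : Int) : Option Int :=
  match acc with
  | none => some x
  | some m => if PySem.List.pyGetD xs x 0 < PySem.List.pyGetD xs m 0 then some x else some m

def gStep (xs : List Int) (b k : Nat) : Nat :=
  if xs.getD k 0 < xs.getD b 0 then k else b

theorem foldl_mStep_cast (xs : List Int) (l : List Nat) : ∀ (bi : Nat),
    List.foldl (mStep xs) (some ((bi : Nat) : Int)) (l.map (fun k => ((k : Nat) : Int)))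
    = some ((List.foldl (gStep xs) bi l : Nat) : Int) := by
  induction l with
  | nil => intro bi; simp
  | cons k t ih =>
      intro bi
      simp only [List.map_cons, List.foldl_cons]
      have hstep : mStep xs (some ((bi : Nat) : Int)) ((k : Nat) : Int)
          = some ((gStep xs bi k : Nat) : Int) := by
        simp only [mStep, PySem.List.pyGetD_natCast, gStep]
        split_ifs <;> rfl
      rw [hstep]
      exact ih _

-- the Nat index fold over range' i |ys| is refMin on the suffix ys = xs.drop i
theorem foldl_gStep_eq_refMin (xs : List Int) (ys : List Int) : ∀ (i bi : Nat) (bv : Int),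
    xs.drop i = ys → xs.getD bi 0 = bv →
    List.foldl (gStep xs) bi (List.range' i ys.length) = refMin ys i bi bv := by
  induction ys with
  | nil => intro i bi bv _ _; simp [refMin]
  | cons x t ih =>
      intro i bi bv hdrop hbv
      have hx : xs.getD i 0 = x := by
        have h0 : (xs.drop i)[0]? = some x := by rw [hdrop]; rfl
        rw [List.getElem?_drop] at h0
        simp only [Nat.add_zero] at h0
        simp [List.getD, h0]
      have hdrop' : xs.drop (i + 1) = t := by
        have h1 := congrArg (List.drop 1) hdrop
        rw [List.drop_drop] at h1
        simpa [Nat.add_comm] using h1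
      simp only [List.length_cons, List.range'_succ, List.foldl_cons, refMin, gStep, hx, hbv]
      split_ifs with hlt
      · exact ih (i + 1) i x hdrop' hx
      · exact ih (i + 1) bi bv hdrop' hbv

-- A's min(range(len(xs)), key=...) equals refMin for nonempty xs
theorem aMin_eq_refMin (v0 : Int) (rest : List Int) :
    PySem.List.minD (PySem.List.pyRange 0 (PySem.List.len (v0 :: rest)) 1)
      (fun k => PySem.List.pyGetD (v0 :: rest) k 0) 0
    = ((refMin rest 1 0 v0 : Nat) : Int) := by
  set xs := v0 :: rest with hxs
  rw [PySem.List.len_eq, PySem.List.pyRange_zero_natCast]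
  have hdef : PySem.List.minD (List.map (fun k => ((k : Nat) : Int)) (List.range xs.length))
        (fun k => PySem.List.pyGetD xs k 0) 0
      = (List.foldl (mStep xs) none
          (List.map (fun k => ((k : Nat) : Int)) (List.range xs.length))).getD 0 := by
    unfold PySem.List.minD PySem.List.min?
    refine congrArg (fun o => Option.getD o 0) ?_
    exact List.foldl_ext _ _ _ (fun acc b _ => by cases acc <;> rfl)
  rw [hdef]
  have hlen : xs.length = rest.length + 1 := by simp [hxs]
  rw [hlen, List.range_eq_range', List.range'_succ]
  simp only [List.map_cons, List.foldl_cons]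
  have h0 : mStep xs none (((0 : Nat) : Nat) : Int) = some ((0 : Nat) : Int) := rfl
  have h1 : (0 : Nat) + 1 = 1 := rfl
  rw [show ((0 : Nat) : Int) = (((0 : Nat) : Nat) : Int) from rfl] at h0
  have hcast := foldl_mStep_cast xs (List.range' 1 rest.length) 0
  have hfold := foldl_gStep_eq_refMin xs rest 1 0 v0 (by simp [hxs]) (by simp [hxs])
  rw [show mStep xs none ((0 : Nat) : Int) = some ((0 : Nat) : Int) from rfl]
  rw [show (0 : Nat) + 1 = 1 from rfl]
  rw [hcast, hfold]
  simp

-- ===== VERDICT (by name: the statement is the Claim_ definition above) =====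
theorem baseline_index_py_spec : Claim_equal_baseline_index_py := by
  intro results _
  unfold Spec_baseline_index_py baseline_index_py baseline_index_py_alt
  cases hiters : PySem.Dict.getD (⟨results⟩ : PySem.Dict String (List Int)) "iter" [] with
  | nil => simp
  | cons v0 rest =>
      simp only [if_neg (by simp : ¬ v0 :: rest = [])]
      cases hz : aZeroScan (PySem.List.enumerate (v0 :: rest) 0) with
      | some j =>
          exact (bLoop_of_zero (v0 :: rest) 0 0 v0 j hz).symm
      | none =>
          rw [aMin_eq_refMin]
          have hb := bLoop_of_none (v0 :: rest) 0 0 v0 (by exact_mod_cast hz)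
          simp only [Nat.cast_zero] at hb
          rw [hb]
          simp only [refMin]
          rw [if_neg (lt_irrefl v0)]
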